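-- pv_equiv track=rewrite | github.com/BertCalm/XO_OX-XOmnibus | Tools/_archive/xpn_aether_family_ultra_diverse.py | pick_engines
-- ===== SOURCE A (Python) =====
-- ALL_ENGINES = [
--     'ODDFELIX', 'ODDOSCAR', 'OVERDUB', 'ODYSSEY', 'OBLONG', 'OBESE',
--     'ONSET', 'OVERWORLD', 'OPAL', 'ORBITAL', 'ORGANON', 'OUROBOROS',
--     'OBSIDIAN', 'OVERBITE', 'ORIGAMI', 'ORACLE', 'OBSCURA', 'OCEANIC',
--     'OCELOT', 'OPTIC', 'OBLIQUE', 'OSPREY', 'OSTERIA', 'OWLFISH',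
--     'OHM', 'ORPHICA', 'OBBLIGATO', 'OTTONI', 'OLE', 'OMBRE',
--     'ORCA', 'OCTOPUS', 'OVERLAP', 'OUTWIT',
-- ]
--
-- def pick_engines(seed_idx, count=2):
--     """Deterministically pick engines cycling through all 34."""
--     out = []
--     for i in range(count):
--         out.append(ALL_ENGINES[(seed_idx + i * 7) % len(ALL_ENGINES)])
--     # Deduplicate preserving order
--     seen = set()
--     result = []
--     for e in out:
--         if e not in seen:
--             seen.add(e)
--             result.append(e)
--     if len(result) < count:
--         for e in ALL_ENGINES:
--             if e not in seen:
--                 seen.add(e)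
--                 result.append(e)
--             if len(result) == count:
--                 break
--     return result
-- ===== SOURCE B (Python) =====
-- ALL_ENGINES = [
--     'ODDFELIX', 'ODDOSCAR', 'OVERDUB', 'ODYSSEY', 'OBLONG', 'OBESE',
--     'ONSET', 'OVERWORLD', 'OPAL', 'ORBITAL', 'ORGANON', 'OUROBOROS',
--     'OBSIDIAN', 'OVERBITE', 'ORIGAMI', 'ORACLE', 'OBSCURA', 'OCEANIC',
--     'OCELOT', 'OPTIC', 'OBLIQUE', 'OSPREY', 'OSTERIA', 'OWLFISH',
--     'OHM', 'ORPHICA', 'OBBLIGATO', 'OTTONI', 'OLE', 'OMBRE',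
--     'ORCA', 'OCTOPUS', 'OVERLAP', 'OUTWIT',
-- ]
--
-- def pick_engines(seed_idx, count=2):
--     """Deterministically pick engines cycling through all 34.
--
--     One closed-form pass: since gcd(7, 34) == 1 the 34 cycled indices are all
--     distinct, so A's dedup removes nothing and its backfill never adds anything;
--     capping at len(ALL_ENGINES) reproduces A exactly for every count."""
--     n = min(count, len(ALL_ENGINES))
--     return [ALL_ENGINES[(seed_idx + i * 7) % len(ALL_ENGINES)] for i in range(n)]
-- ===== Notes on version B (the rewrite author's own statement) =====
-- stated objective: faster
-- what changed: B replaces A's three passes (append loop over range(count), set-based dedup, backfill loop) by a single closed-form comprehension over range(min(count, 34)), valid because gcd(7,34)=1 makes the cycled indices distinct, so dedup and backfill are dead code.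
import Mathlib
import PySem

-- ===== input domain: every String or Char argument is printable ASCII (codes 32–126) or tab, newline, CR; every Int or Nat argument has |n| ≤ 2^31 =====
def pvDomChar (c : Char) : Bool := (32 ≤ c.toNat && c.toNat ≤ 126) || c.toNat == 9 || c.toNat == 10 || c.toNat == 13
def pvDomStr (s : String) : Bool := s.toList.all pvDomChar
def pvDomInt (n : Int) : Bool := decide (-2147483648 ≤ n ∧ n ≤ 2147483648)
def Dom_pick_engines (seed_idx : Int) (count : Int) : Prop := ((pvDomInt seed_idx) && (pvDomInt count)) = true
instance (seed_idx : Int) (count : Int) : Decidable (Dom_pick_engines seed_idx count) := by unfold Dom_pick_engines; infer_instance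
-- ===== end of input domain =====

-- B collapses A's three passes (append loop, set dedup, backfill) into one closed-form
-- indexing pass over range(min(count, 34)); equal because gcd(7,34)=1 keeps the indices distinct.


-- ===== PORT A =====
def allEngines : List String := [
    "ODDFELIX", "ODDOSCAR", "OVERDUB", "ODYSSEY", "OBLONG", "OBESE",
    "ONSET", "OVERWORLD", "OPAL", "ORBITAL", "ORGANON", "OUROBOROS",
    "OBSIDIAN", "OVERBITE", "ORIGAMI", "ORACLE", "OBSCURA", "OCEANIC",
    "OCELOT", "OPTIC", "OBLIQUE", "OSPREY", "OSTERIA", "OWLFISH",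
    "OHM", "ORPHICA", "OBBLIGATO", "OTTONI", "OLE", "OMBRE",
    "ORCA", "OCTOPUS", "OVERLAP", "OUTWIT"]

-- one step of A's dedup loop: 'if e not in seen: seen.add(e); result.append(e)'
def dedupStep (p : PySem.Set String × List String) (e : String) : PySem.Set String × List String :=
  if e ∈ p.1 then p else (PySem.Set.add p.1 e, p.2 ++ [e])

-- A's backfill loop 'for e in ALL_ENGINES: … if len(result) == count: break'
def backfillLoop : List String → PySem.Set String → List String → Int → List String
  | [], _, result, _ => result
  | e :: rest, seen, result, count =>
    let p := if e ∈ seen then (seen, result) else (PySem.Set.add seen e, result ++ [e])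
    if (p.2.length : Int) = count then p.2 else backfillLoop rest p.1 p.2 count

-- ALL_ENGINES[(seed_idx + i*7) % len(ALL_ENGINES)]: the index is a Python mod by the positive
-- length, hence always in range, so pyGet? never returns none and the .getD "" is unreachable.
def pick_engines (seed_idx : Int) (count : Int) : List String :=
  let out := (PySem.List.pyRange 0 count 1).foldl
    (fun acc i =>
      acc ++ [(PySem.List.pyGet? allEngines
        (PySem.Int.mod (seed_idx + i * 7) (allEngines.length : Int))).getD ""]) []
  let sr := out.foldl dedupStep (([] : PySem.Set String), ([] : List String))
  if (sr.2.length : Int) < count then backfillLoop allEngines sr.1 sr.2 count else sr.2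

-- ===== PORT B =====
def pick_engines_alt (seed_idx : Int) (count : Int) : List String :=
  let n := min count (allEngines.length : Int)
  (PySem.List.pyRange 0 n 1).map
    (fun i => (PySem.List.pyGet? allEngines
      (PySem.Int.mod (seed_idx + i * 7) (allEngines.length : Int))).getD "")

-- ===== PRECONDITION & SPEC =====
def Spec_pick_engines (seed_idx : Int) (count : Int) (out : List String) : Prop := out = pick_engines_alt seed_idx count
instance (seed_idx : Int) (count : Int) (out : List String) : Decidable (Spec_pick_engines seed_idx count out) := by unfold Spec_pick_engines; infer_instance

-- ===== CLAIM (what is proved, stated in full; the proofs are below) =====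
def Claim_equal_pick_engines : Prop := ∀ (seed_idx : Int) (count : Int), Dom_pick_engines seed_idx count → Spec_pick_engines seed_idx count (pick_engines seed_idx count)

-- ===== LEMMAS AND PROOFS =====

-- the engine picked for cycle position i
def engAt (s i : Int) : String :=
  (PySem.List.pyGet? allEngines (PySem.Int.mod (s + i * 7) (allEngines.length : Int))).getD ""

lemma allEngines_length : allEngines.length = 34 := rfl

lemma allEngines_nodup : allEngines.Nodup := by decide

lemma engAt_eq_getElem (s i : Int) :
    engAt s i = allEngines[((s + i * 7) % 34).toNat]'(by
      show ((s + i * 7) % 34).toNat < 34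
      omega) := by
  show (PySem.List.pyGet? allEngines (PySem.Int.mod (s + i * 7) 34)).getD "" = _
  rw [PySem.Int.mod_eq_emod_of_pos (by norm_num : (0:Int) < 34)]
  rw [PySem.List.pyGet?_eq_some_getElem allEngines
    (Int.emod_nonneg _ (by norm_num))
    (by show _ < ((34:Nat):Int); exact_mod_cast Int.emod_lt_of_pos (s + i * 7) (by norm_num))]
  rfl

lemma engAt_mem (s i : Int) : engAt s i ∈ allEngines := by
  rw [engAt_eq_getElem]; exact List.getElem_mem _

lemma engAt_period (s i : Int) : engAt s i = engAt s (i % 34) := by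
  have h : (s + i * 7) % 34 = (s + (i % 34) * 7) % 34 := by omega
  rw [engAt_eq_getElem, engAt_eq_getElem]
  congr 1
  omega

lemma engAt_inj (s i j : Int) (hi : 0 ≤ i) (hi' : i < 34) (hj : 0 ≤ j) (hj' : j < 34)
    (h : engAt s i = engAt s j) : i = j := by
  rw [engAt_eq_getElem, engAt_eq_getElem] at h
  have := (allEngines_nodup.getElem_inj_iff).mp h
  omega

-- characterization of A's dedup fold on a nodup list disjoint from seen
lemma dedupFold_nodup (l : List String) :
    ∀ (S : PySem.Set String) (r : List String), l.Nodup → (∀ x ∈ l, x ∉ S) →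
      (l.foldl dedupStep (S, r)).2 = r ++ l ∧
      (∀ y, y ∈ (l.foldl dedupStep (S, r)).1 ↔ y ∈ S ∨ y ∈ l) := by
  induction l with
  | nil => intro S r _ _; simp
  | cons e rest ih =>
    intro S r hnd hdis
    have he : e ∉ S := hdis e (by simp)
    have hstep : dedupStep (S, r) e = (PySem.Set.add S e, r ++ [e]) := by
      simp [dedupStep, he]
    rw [List.foldl_cons, hstep]
    have hnd' : rest.Nodup := hnd.of_cons
    have hdis' : ∀ x ∈ rest, x ∉ PySem.Set.add S e := by
      intro x hx
      rw [PySem.Set.mem_add, not_or]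
      exact ⟨hdis x (by simp [hx]), fun hxe => (List.nodup_cons.mp hnd).1 (hxe ▸ hx)⟩
    obtain ⟨h2, h1⟩ := ih (PySem.Set.add S e) (r ++ [e]) hnd' hdis'
    constructor
    · rw [h2]; simp
    · intro y
      rw [h1 y, PySem.Set.mem_add]
      simp
      tauto

-- the dedup fold is inert once everything has been seen
lemma dedupFold_allmem (l : List String) :
    ∀ (S : PySem.Set String) (r : List String), (∀ x ∈ l, x ∈ S) →
      l.foldl dedupStep (S, r) = (S, r) := by
  induction l with
  | nil => intro S r _; rfl
  | cons e rest ih =>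
    intro S r h
    have he : e ∈ S := h e (by simp)
    rw [List.foldl_cons]
    have : dedupStep (S, r) e = (S, r) := by simp [dedupStep, he]
    rw [this]
    exact ih S r (fun x hx => h x (by simp [hx]))

-- the backfill loop is inert once everything has been seen
lemma backfillLoop_allmem (l : List String) :
    ∀ (S : PySem.Set String) (r : List String) (c : Int), (∀ x ∈ l, x ∈ S) →
      backfillLoop l S r c = r := by
  induction l with
  | nil => intro S r c _; rfl
  | cons e rest ih =>
    intro S r c h
    have he : e ∈ S := h e (by simp)
    unfold backfillLoop
    simp only [he, if_true]
    split
    · rfl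
    · exact ih S r c (fun x hx => h x (by simp [hx]))

-- A's first loop is a map over the range
lemma out_eq_map (s c : Int) :
    ((PySem.List.pyRange 0 c 1).foldl
      (fun acc i =>
        acc ++ [(PySem.List.pyGet? allEngines
          (PySem.Int.mod (s + i * 7) (allEngines.length : Int))).getD ""]) []) =
    (PySem.List.pyRange 0 c 1).map (engAt s) := by
  rw [PySem.List.foldl_append_singleton_eq_map]
  rfl

-- the mapped window [0,34) is nodup
lemma map_window_nodup (s : Int) : ((PySem.List.pyRange 0 34 1).map (engAt s)).Nodup := by
  apply List.Nodup.map_on _ (PySem.List.nodup_pyRange_one 0 34)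
  intro i hi j hj hij
  rw [PySem.List.mem_pyRange_one] at hi hj
  exact engAt_inj s i j hi.1 hi.2 hj.1 hj.2 hij

-- and covers every engine (34 distinct members of a 34-element nodup list)
lemma map_window_covers (s : Int) : ∀ x ∈ allEngines, x ∈ (PySem.List.pyRange 0 34 1).map (engAt s) := by
  intro x hx
  have hsub : (PySem.List.pyRange 0 34 1).map (engAt s) ⊆ allEngines := by
    intro y hy
    obtain ⟨i, _, rfl⟩ := List.mem_map.mp hy
    exact engAt_mem s i
  have hsp : ((PySem.List.pyRange 0 34 1).map (engAt s)).Subperm allEngines :=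
    (map_window_nodup s).subperm hsub
  have hlen : allEngines.length ≤ ((PySem.List.pyRange 0 34 1).map (engAt s)).length := by
    rw [List.length_map, PySem.List.length_pyRange_one, allEngines_length]
    omega
  exact (hsp.perm_of_length_le hlen).mem_iff.mpr hx

lemma alt_eq_map (s c : Int) :
    pick_engines_alt s c = (PySem.List.pyRange 0 (min c 34) 1).map (engAt s) := by
  unfold pick_engines_alt
  rfl

-- ===== VERDICT (by name: the statement is the Claim_ definition above) =====
theorem pick_engines_spec : Claim_equal_pick_engines := by
  intro s c _
  unfold Spec_pick_engines pick_engines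
  rw [out_eq_map, alt_eq_map]
  by_cases hc : c ≤ 34
  · -- no backfill: the window [0, c) is already nodup
    have hmin : min c 34 = c := min_eq_left hc
    rw [hmin]
    have hnd : ((PySem.List.pyRange 0 c 1).map (engAt s)).Nodup := by
      apply List.Nodup.map_on _ (PySem.List.nodup_pyRange_one 0 c)
      intro i hi j hj hij
      rw [PySem.List.mem_pyRange_one] at hi hj
      exact engAt_inj s i j hi.1 (by omega) hj.1 (by omega) hij
    obtain ⟨h2, _⟩ := dedupFold_nodup ((PySem.List.pyRange 0 c 1).map (engAt s)) [] []
      hnd (by simp)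
    simp only [h2, List.nil_append]
    have hlen : ((((PySem.List.pyRange 0 c 1).map (engAt s)).length : Int)) = max c 0 := by
      rw [List.length_map, PySem.List.length_pyRange_one]; omega
    rw [if_neg (by rw [hlen]; omega)]
  · -- count > 34: dedup keeps exactly the first 34, backfill is inert
    rw [not_le] at hc
    have hmin : min c 34 = 34 := min_eq_right (by omega)
    rw [hmin]
    simp only [PySem.List.pyRange_one_append 0 34 c (by norm_num) (by omega : (34:Int) ≤ c),
      List.map_append, List.foldl_append]
    obtain ⟨h2, h1⟩ := dedupFold_nodup ((PySem.List.pyRange 0 34 1).map (engAt s)) [] []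
      (map_window_nodup s) (by simp)
    set P := ((PySem.List.pyRange 0 34 1).map (engAt s)).foldl dedupStep ([], []) with hP
    have hP2 : P.2 = (PySem.List.pyRange 0 34 1).map (engAt s) := by rw [h2]; rfl
    have hcov : ∀ x ∈ (PySem.List.pyRange 34 c 1).map (engAt s), x ∈ P.1 := by
      intro x hx
      obtain ⟨i, hi, rfl⟩ := List.mem_map.mp hx
      rw [PySem.List.mem_pyRange_one] at hi
      rw [h1]
      right
      rw [engAt_period s i]
      exact List.mem_map.mpr ⟨i % 34, PySem.List.mem_pyRange_one.mpr (by omega), rfl⟩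
    have hfold2 : ((PySem.List.pyRange 34 c 1).map (engAt s)).foldl dedupStep P = P := by
      obtain ⟨a, b⟩ := P
      exact dedupFold_allmem _ a b hcov
    rw [hfold2, hP2]
    rw [if_pos (by rw [List.length_map, PySem.List.length_pyRange_one]; simp; omega)]
    apply backfillLoop_allmem
    intro x hx
    rw [h1]
    right
    exact map_window_covers s x hx
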